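-- pv_equiv track=rewrite | github.com/fkguo/autoresearch-lab | skills/research-team/scripts/gates/check_markdown_math_portability.py | _iter_inline_math_segments
-- ===== SOURCE A (Python) =====
-- def _is_escaped(text: str, idx: int) -> bool:
--     # Is the character at idx escaped by an odd number of preceding backslashes?
--     bs = 0
--     j = idx - 1
--     while j >= 0 and text[j] == "\\":
--         bs += 1
--         j -= 1
--     return (bs % 2) == 1
--
-- def _iter_inline_math_segments(line: str) -> list[str]:
--     """
--     Return inline math segments inside $...$ for a single line.
--     - Best-effort only; ignores $$...$$ display on the same line (disallowed elsewhere by policy).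
--     - Honors escaped dollars (\\$).
--     """
--     segs: list[str] = []
--     in_math = False
--     start = 0
--     i = 0
--     while i < len(line):
--         ch = line[i]
--         if ch == "$" and not _is_escaped(line, i):
--             # Skip $$ (inline display math is disallowed by another gate).
--             if (i + 1) < len(line) and line[i + 1] == "$" and not _is_escaped(line, i + 1):
--                 i += 2
--                 continue
--             if not in_math:
--                 in_math = True
--                 start = i + 1
--             else:
--                 segs.append(line[start:i])
--                 in_math = False
--         i += 1
--     return segs
-- ===== SOURCE B (Python) =====
-- def _iter_inline_math_segments(line: str) -> list[str]:
--     # Staged pipeline instead of one stateful scan: (1) collect positions of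
--     # unescaped '$' with a running backslash counter, (2) drop adjacent
--     # position pairs ($$), (3) pair the survivors and slice between them.
--     positions: list[int] = []
--     bs = 0
--     for i, ch in enumerate(line):
--         if ch == "\\":
--             bs += 1
--             continue
--         if ch == "$" and bs % 2 == 0:
--             positions.append(i)
--         bs = 0
--     kept: list[int] = []
--     k = 0
--     while k < len(positions):
--         if k + 1 < len(positions) and positions[k + 1] == positions[k] + 1:
--             k += 2
--         else:
--             kept.append(positions[k])
--             k += 1
--     return [line[a + 1 : b] for a, b in zip(kept[::2], kept[1::2])]
-- ===== Notes on version B (the rewrite author's own statement) =====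
-- stated objective: faster
-- what changed: Replaced A's single stateful scan with a backward escape-rescan at every dollar sign by a three-stage pipeline: collect unescaped dollar positions with a running backslash counter, drop adjacent position pairs (double dollars), then pair the survivors and slice between them.
import Mathlib
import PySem

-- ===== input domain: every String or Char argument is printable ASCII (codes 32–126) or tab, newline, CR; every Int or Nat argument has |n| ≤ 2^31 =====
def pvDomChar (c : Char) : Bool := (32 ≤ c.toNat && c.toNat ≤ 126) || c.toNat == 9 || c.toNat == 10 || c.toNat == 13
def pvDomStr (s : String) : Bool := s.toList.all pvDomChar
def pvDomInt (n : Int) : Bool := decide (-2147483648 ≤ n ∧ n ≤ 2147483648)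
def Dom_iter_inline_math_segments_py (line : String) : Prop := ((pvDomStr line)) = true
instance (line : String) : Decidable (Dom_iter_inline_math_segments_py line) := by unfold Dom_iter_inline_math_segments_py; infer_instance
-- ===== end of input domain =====

-- B replaces A's single stateful scan (with a backward escape-rescan at every '$') by a
-- three-stage pipeline: unescaped-'$' positions, drop adjacent pairs ($$), pair and slice
-- (objective: alternative staged algorithm, linear worst case).

-- ===== PORT A =====

-- port of _is_escaped's backward while loop: count of consecutive backslashes
-- ending just before index i (the loop 'j = idx-1; while j >= 0 and text[j] == "\\"').
def pvBsCount (cs : List Char) : Nat → Nat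
  | 0 => 0
  | j + 1 => if cs.getD j ' ' = '\\' then pvBsCount cs j + 1 else 0

-- port of _is_escaped(text, idx)
def pvIsEscaped (cs : List Char) (i : Nat) : Bool := pvBsCount cs i % 2 == 1

-- port of A's main while loop
def pvALoop (cs : List Char) (i : Nat) (inMath : Bool) (start : Nat) (segs : List String) :
    List String :=
  if h : i < cs.length then
    if cs.getD i ' ' = '$' ∧ pvIsEscaped cs i = false then
      if i + 1 < cs.length ∧ cs.getD (i + 1) ' ' = '$' ∧ pvIsEscaped cs (i + 1) = false then
        pvALoop cs (i + 2) inMath start segs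
      else if inMath = false then
        pvALoop cs (i + 1) true (i + 1) segs
      else
        pvALoop cs (i + 1) false start (segs ++ [String.mk ((cs.drop start).take (i - start))])
    else
      pvALoop cs (i + 1) inMath start segs
  else segs
termination_by cs.length - i
decreasing_by all_goals omega

def iter_inline_math_segments_py (line : String) : List String :=
  pvALoop line.toList 0 false 0 []

-- ===== PORT B =====

-- stage 1 of B: positions of unescaped '$' (the 'for i, ch in enumerate(line)' loop)
def pvPositions (cs : List Char) (i : Nat) (bs : Nat) : List Nat :=
  if h : i < cs.length then
    if cs.getD i ' ' = '\\' then pvPositions cs (i + 1) (bs + 1)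
    else if cs.getD i ' ' = '$' ∧ bs % 2 = 0 then i :: pvPositions cs (i + 1) 0
    else pvPositions cs (i + 1) 0
  else []
termination_by cs.length - i
decreasing_by all_goals omega

-- stage 2 of B: drop adjacent position pairs (the '$$' positions)
def pvKept : List Nat → List Nat
  | [] => []
  | [p] => [p]
  | p :: q :: rest => if q = p + 1 then pvKept rest else p :: pvKept (q :: rest)

-- stage 3 of B: 'zip(kept[::2], kept[1::2])' pairing with the slice line[a+1:b]
def pvPairs (cs : List Char) : List Nat → List String
  | a :: b :: rest => String.mk ((cs.drop (a + 1)).take (b - (a + 1))) :: pvPairs cs rest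
  | _ => []

def iter_inline_math_segments_py_alt (line : String) : List String :=
  pvPairs line.toList (pvKept (pvPositions line.toList 0 0))

-- ===== PRECONDITION & SPEC =====
def Spec_iter_inline_math_segments_py (line : String) (out : List String) : Prop := out = iter_inline_math_segments_py_alt line
instance (line : String) (out : List String) : Decidable (Spec_iter_inline_math_segments_py line out) := by unfold Spec_iter_inline_math_segments_py; infer_instance

-- ===== CLAIM (what is proved, stated in full; the proofs are below) =====
def Claim_equal_iter_inline_math_segments_py : Prop := ∀ (line : String), Dom_iter_inline_math_segments_py line → Spec_iter_inline_math_segments_py line (iter_inline_math_segments_py line)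

-- ===== LEMMAS AND PROOFS =====

theorem pvBsCount_succ (cs : List Char) (j : Nat) :
    pvBsCount cs (j + 1) = if cs.getD j ' ' = '\\' then pvBsCount cs j + 1 else 0 := rfl

-- every collected position is at or after the scan index and carries a '$'
theorem pvPositions_mem (n : Nat) : ∀ (cs : List Char) (i bs : Nat), cs.length ≤ i + n →
    ∀ p ∈ pvPositions cs i bs, i ≤ p ∧ cs.getD p ' ' = '$' := by
  induction n with
  | zero =>
    intro cs i bs hn p hp
    rw [pvPositions, dif_neg (by omega)] at hp
    simp at hp
  | succ n ih =>
    intro cs i bs hn p hp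
    by_cases hi : i < cs.length
    · rw [pvPositions, dif_pos hi] at hp
      split_ifs at hp with h1 h2
      · have := ih cs (i + 1) (bs + 1) (by omega) p hp
        exact ⟨by omega, this.2⟩
      · rcases List.mem_cons.mp hp with rfl | hp'
        · exact ⟨le_refl _, h2.1⟩
        · have := ih cs (i + 1) 0 (by omega) p hp'
          exact ⟨by omega, this.2⟩
      · have := ih cs (i + 1) 0 (by omega) p hp
        exact ⟨by omega, this.2⟩
    · rw [pvPositions, dif_neg hi] at hp
      simp at hp

theorem pvKept_cons (p : Nat) (ps : List Nat) (h : ∀ q ∈ ps, q ≠ p + 1) :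
    pvKept (p :: ps) = p :: pvKept ps := by
  cases ps with
  | nil => rfl
  | cons q rest =>
    have : q ≠ p + 1 := h q (List.mem_cons_self ..)
    rw [pvKept, if_neg this]

-- the pending-open state of A rendered as a position list for B's pairing stage
def pvPend (inMath : Bool) (start : Nat) (l : List Nat) : List Nat :=
  if inMath then (start - 1) :: l else l

theorem pvPend_true (s : Nat) (l : List Nat) : pvPend true s l = (s - 1) :: l := rfl
theorem pvPend_false (s : Nat) (l : List Nat) : pvPend false s l = l := rfl

-- main invariant: A's loop computes exactly B's staged pipeline on the rest of the line
theorem pvMain (n : Nat) : ∀ (cs : List Char) (i : Nat) (inMath : Bool) (start : Nat)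
    (segs : List String), cs.length ≤ i + n → (inMath = true → 1 ≤ start) →
    pvALoop cs i inMath start segs =
      segs ++ pvPairs cs (pvPend inMath start (pvKept (pvPositions cs i (pvBsCount cs i)))) := by
  induction n with
  | zero =>
    intro cs i inMath start segs hn hs
    rw [pvALoop, dif_neg (by omega), pvPositions, dif_neg (by omega)]
    cases inMath <;> simp [pvPend, pvKept, pvPairs]
  | succ n ih =>
    intro cs i inMath start segs hn hs
    by_cases hi : i < cs.length
    · rw [pvALoop, dif_pos hi, pvPositions, dif_pos hi]
      by_cases hb : cs.getD i ' ' = '\\'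
      · have hch : ¬ (cs.getD i ' ' = '$' ∧ pvIsEscaped cs i = false) := by
          rintro ⟨h1, -⟩; rw [hb] at h1; exact absurd h1 (by decide)
        rw [if_neg hch, if_pos hb, ih cs (i + 1) inMath start segs (by omega) hs,
            pvBsCount_succ, if_pos hb]
      · have hnext : pvBsCount cs (i + 1) = 0 := by rw [pvBsCount_succ, if_neg hb]
        rw [if_neg hb]
        by_cases hd : cs.getD i ' ' = '$' ∧ pvBsCount cs i % 2 = 0
        · have hesc : pvIsEscaped cs i = false := by simp [pvIsEscaped, hd.2]
          rw [if_pos hd, if_pos ⟨hd.1, hesc⟩]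
          have hesc1 : pvIsEscaped cs (i + 1) = false := by simp [pvIsEscaped, hnext]
          by_cases hdd : i + 1 < cs.length ∧ cs.getD (i + 1) ' ' = '$'
          · -- '$$': A skips two; B's stage 2 drops the adjacent pair
            rw [if_pos ⟨hdd.1, hdd.2, hesc1⟩, ih cs (i + 2) inMath start segs (by omega) hs]
            have hnd : ¬ (cs.getD (i + 1) ' ' = '\\') := by rw [hdd.2]; decide
            have h2 : pvBsCount cs (i + 2) = 0 := by rw [pvBsCount_succ, if_neg hnd]
            have hpos1 : pvPositions cs (i + 1) 0 = (i + 1) :: pvPositions cs (i + 2) 0 := by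
              rw [pvPositions, dif_pos hdd.1, if_neg hnd, if_pos ⟨hdd.2, by omega⟩]
            have hkd : pvKept (i :: (i + 1) :: pvPositions cs (i + 2) 0) =
                pvKept (pvPositions cs (i + 2) 0) := by rw [pvKept, if_pos rfl]
            rw [h2, hpos1, hkd]
          · have hA : ¬ (i + 1 < cs.length ∧ cs.getD (i + 1) ' ' = '$' ∧
                pvIsEscaped cs (i + 1) = false) := by
              rintro ⟨h1, h2, -⟩; exact hdd ⟨h1, h2⟩
            rw [if_neg hA]
            -- stage 2 keeps position i: the next collected position cannot be i+1
            have hkc : pvKept (i :: pvPositions cs (i + 1) 0) =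
                i :: pvKept (pvPositions cs (i + 1) 0) := by
              apply pvKept_cons
              intro q hq
              have := pvPositions_mem n cs (i + 1) 0 (by omega) q hq
              intro hq1
              subst hq1
              have hlt : i + 1 < cs.length := by
                by_contra hge
                rw [List.getD_eq_default _ _ (by omega)] at this
                exact absurd this.2 (by decide)
              exact hdd ⟨hlt, this.2⟩
            by_cases hm : inMath = false
            · rw [if_pos hm, ih cs (i + 1) true (i + 1) segs (by omega) (by omega), hnext,
                  hm, hkc, pvPend_true, pvPend_false]
              simp
            · rw [if_neg hm,
                  ih cs (i + 1) false start
                    (segs ++ [String.mk ((cs.drop start).take (i - start))]) (by omega)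
                    (by simp), hnext, hkc]
              have hm' : inMath = true := by cases inMath <;> simp_all
              have hst : 1 ≤ start := hs hm'
              rw [hm', pvPend_true, pvPend_false, pvPairs]
              have h1 : start - 1 + 1 = start := by omega
              rw [h1, List.append_assoc]
              rfl
        · have hA : ¬ (cs.getD i ' ' = '$' ∧ pvIsEscaped cs i = false) := by
            rintro ⟨h1, h2⟩
            exact hd ⟨h1, by simp [pvIsEscaped] at h2; omega⟩
          rw [if_neg hA, if_neg hd, ih cs (i + 1) inMath start segs (by omega) hs, hnext]
    · rw [pvALoop, dif_neg hi, pvPositions, dif_neg hi]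
      cases inMath <;> simp [pvPend, pvKept, pvPairs]

-- ===== VERDICT (by name: the statement is the Claim_ definition above) =====
theorem iter_inline_math_segments_py_spec : Claim_equal_iter_inline_math_segments_py := by
  intro line _
  unfold Spec_iter_inline_math_segments_py iter_inline_math_segments_py iter_inline_math_segments_py_alt
  have h := pvMain line.toList.length line.toList 0 false 0 [] (by omega) (by simp)
  simpa [pvPend, pvBsCount] using h
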